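-- pv_equiv track=rewrite | github.com/patrickjennings/adventofcode2018 | day2/runner_one.py | hash_input_file
-- ===== SOURCE A (Python) =====
-- from collections import Counter
--
-- def check_for_duplicates_and_triplicates(input_string):
--     character_counts = Counter(input_string).values()
--     return (2 in character_counts, 3 in character_counts)
--
-- def hash_input_file(input_file):
--     character_counts = (
--         check_for_duplicates_and_triplicates(input_string)
--         for input_string in input_file
--     )
--     doubles, triples = 0, 0
--     for character_count in character_counts:
--         doubles += character_count[0]
--         triples += character_count[1]
--     return doubles * triples
-- ===== SOURCE B (Python) =====
-- def check_run_lengths(input_string):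
--     # sort the characters, then scan consecutive runs collecting run lengths
--     lengths = set()
--     prev = None
--     run = 0
--     for c in sorted(input_string):
--         if c == prev:
--             run += 1
--         else:
--             if run:
--                 lengths.add(run)
--             prev, run = c, 1
--     if run:
--         lengths.add(run)
--     return (2 in lengths, 3 in lengths)
--
--
-- def hash_input_file(input_file):
--     doubles, triples = 0, 0
--     for s in input_file:
--         two, three = check_run_lengths(s)
--         doubles += two
--         triples += three
--     return doubles * triples
-- ===== Notes on version B (the rewrite author's own statement) =====
-- stated objective: alternative
-- what changed: Per line, replaces hash-based frequency counting (Counter + membership in its values) by sort-then-scan: sort the characters, sweep consecutive equal runs once collecting the set of run lengths, and test 2/3 membership in that set.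
import Mathlib
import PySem

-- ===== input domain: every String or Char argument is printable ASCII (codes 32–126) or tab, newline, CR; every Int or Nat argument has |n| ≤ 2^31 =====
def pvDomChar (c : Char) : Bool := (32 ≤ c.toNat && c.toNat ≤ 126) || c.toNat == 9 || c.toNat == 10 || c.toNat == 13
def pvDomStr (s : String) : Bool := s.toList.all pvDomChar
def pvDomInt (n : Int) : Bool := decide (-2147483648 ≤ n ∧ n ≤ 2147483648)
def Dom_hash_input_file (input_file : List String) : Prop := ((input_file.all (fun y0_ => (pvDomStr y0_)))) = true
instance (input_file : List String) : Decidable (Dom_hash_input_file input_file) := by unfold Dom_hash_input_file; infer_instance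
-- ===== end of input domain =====

-- B replaces A's per-line hash-based Counter with sort-then-scan of consecutive equal
-- runs, collecting the set of run lengths (objective: alternative algorithm).

-- ===== PORT A =====
def check_for_duplicates_and_triplicates (input_string : String) : Bool × Bool :=
  let character_counts := (PySem.Dict.counter input_string.toList).values
  (character_counts.contains (2 : Int), character_counts.contains (3 : Int))

def hash_input_file (input_file : List String) : Int :=
  let character_counts := input_file.map check_for_duplicates_and_triplicates
  let dt : Int × Int := character_counts.foldl
    (fun (acc : Int × Int) cc =>
      (acc.1 + (if cc.1 then 1 else 0), acc.2 + (if cc.2 then 1 else 0)))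
    (0, 0)
  dt.1 * dt.2

-- ===== PORT B =====
-- loop body of the run scan: state is (lengths set, previous char, current run length)
def rlStep (st : PySem.Set Int × Option Char × Int) (c : Char) :
    PySem.Set Int × Option Char × Int :=
  if (some c : Option Char) == st.2.1 then (st.1, st.2.1, st.2.2 + 1)
  else ((if st.2.2 != 0 then PySem.Set.add st.1 st.2.2 else st.1), some c, 1)

-- final 'if run: lengths.add(run)'
def rlFinish (st : PySem.Set Int × Option Char × Int) : PySem.Set Int :=
  if st.2.2 != 0 then PySem.Set.add st.1 st.2.2 else st.1

def check_run_lengths (input_string : String) : Bool × Bool :=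
  let lengths := rlFinish
    ((PySem.List.sorted input_string.toList (fun x => x) false).foldl rlStep
      (PySem.Set.empty, none, 0))
  (lengths.contains (2 : Int), lengths.contains (3 : Int))

def hash_input_file_alt (input_file : List String) : Int :=
  let dt : Int × Int := input_file.foldl
    (fun (acc : Int × Int) s =>
      let r := check_run_lengths s
      (acc.1 + (if r.1 then 1 else 0), acc.2 + (if r.2 then 1 else 0)))
    (0, 0)
  dt.1 * dt.2

-- ===== PRECONDITION & SPEC =====
def Spec_hash_input_file (input_file : List String) (out : Int) : Prop := out = hash_input_file_alt input_file
instance (input_file : List String) (out : Int) : Decidable (Spec_hash_input_file input_file out) := by unfold Spec_hash_input_file; infer_instance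

-- ===== CLAIM (what is proved, stated in full; the proofs are below) =====
def Claim_equal_hash_input_file : Prop := ∀ (input_file : List String), Dom_hash_input_file input_file → Spec_hash_input_file input_file (hash_input_file input_file)

-- ===== LEMMAS AND PROOFS =====

-- 'v ∈ Counter(xs).values()' ↔ some element of xs occurs exactly v times
theorem values_counter_contains (xs : List Char) (v : Int) :
    ((PySem.Dict.counter xs).values).contains v
      = xs.any (fun c => PySem.List.count xs c == v) := by
  have hv : (PySem.Dict.counter xs).values
      = (PySem.Set.ofList xs).map (fun k => (xs.count k : Int)) := by
    have := PySem.Dict.items_counter (xs := xs)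
    simp [PySem.Dict.values, this, List.map_map, Function.comp_def]
  rw [hv]
  apply Bool.eq_iff_iff.mpr
  simp only [List.contains_eq_any_beq, List.any_map, Function.comp_def, List.any_eq_true,
    PySem.List.count_eq, beq_iff_eq]
  constructor
  · rintro ⟨c, hc, h⟩
    exact ⟨c, (PySem.Set.mem_ofList xs c).1 hc, h.symm⟩
  · rintro ⟨c, hc, h⟩
    exact ⟨c, (PySem.Set.mem_ofList xs c).2 hc, h.symm⟩

-- invariant of the run scan over a sorted suffix ys: prev = some cur with current run n ≥ 1
theorem rl_fold_contains (ys : List Char) (L : PySem.Set Int) (cur : Char) (n : Int)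
    (hn : 1 ≤ n) (hs : ys.Pairwise (· ≤ ·)) (hcur : ∀ y ∈ ys, cur ≤ y) (k : Int) :
    ((rlFinish (ys.foldl rlStep (L, some cur, n))).contains k = true) ↔
      (k ∈ L ∨ k = n + (ys.count cur : Int) ∨ ∃ d ∈ ys, d ≠ cur ∧ (ys.count d : Int) = k) := by
  induction ys generalizing L cur n with
  | nil =>
      have hne : (n != 0) = true := by simp; omega
      simp only [List.foldl_nil, rlFinish, hne, if_pos, List.count_nil, Nat.cast_zero,
        add_zero, List.not_mem_nil]
      simp [PySem.Set.mem_add]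
  | cons c ys ih =>
      have hcnt_self : ((c :: ys).count c : Int) = (ys.count c : Int) + 1 := by
        simp
      have hcnt_ne : ∀ d : Char, d ≠ c → ((c :: ys).count d : Int) = (ys.count d : Int) := by
        intro d hd
        have hcd : ¬ c = d := fun h => hd h.symm
        simp [hcd]
      by_cases hc : c = cur
      · subst hc
        have hstep : rlStep (L, some c, n) c = (L, some c, n + 1) := by simp [rlStep]
        rw [List.foldl_cons, hstep,
          ih L c (n + 1) (by omega) (hs.sublist (List.sublist_cons_self c ys))
            (fun y hy => List.rel_of_pairwise_cons hs hy)]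
        constructor
        · rintro (h | h | ⟨d, hd, hdc, hcnt⟩)
          · exact Or.inl h
          · refine Or.inr (Or.inl ?_); rw [hcnt_self]; omega
          · exact Or.inr (Or.inr ⟨d, List.mem_cons_of_mem _ hd, hdc, by
              rw [hcnt_ne d hdc]; exact hcnt⟩)
        · rintro (h | h | ⟨d, hd, hdc, hcnt⟩)
          · exact Or.inl h
          · refine Or.inr (Or.inl ?_); rw [hcnt_self] at h; omega
          · rcases List.mem_cons.1 hd with rfl | hd'
            · exact absurd rfl hdc
            · exact Or.inr (Or.inr ⟨d, hd', hdc, by rw [hcnt_ne d hdc] at hcnt; exact hcnt⟩)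
      · have hne : (n != 0) = true := by simp; omega
        have hstep : rlStep (L, some cur, n) c = (PySem.Set.add L n, some c, 1) := by
          simp [rlStep, hc, hne]
        have hcle : cur ≤ c := hcur c List.mem_cons_self
        have hclt : cur < c := lt_of_le_of_ne hcle (fun h => hc h.symm)
        have hys : ∀ y ∈ ys, c ≤ y := fun y hy => List.rel_of_pairwise_cons hs hy
        have hnotmem : cur ∉ c :: ys := by
          intro hmem
          rcases List.mem_cons.1 hmem with rfl | hmem'
          · exact hc rfl
          · exact absurd (lt_of_lt_of_le hclt (hys _ hmem')) (lt_irrefl cur)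
        have hcnt0 : ((c :: ys).count cur : Int) = 0 := by
          rw [List.count_eq_zero.2 hnotmem]; simp
        rw [List.foldl_cons, hstep,
          ih (PySem.Set.add L n) c 1 (le_refl 1)
            (hs.sublist (List.sublist_cons_self c ys)) hys]
        rw [hcnt0]
        simp only [PySem.Set.mem_add]
        constructor
        · rintro ((h | h) | h | ⟨d, hd, hdc, hcnt⟩)
          · exact Or.inl h
          · exact Or.inr (Or.inl (by omega))
          · exact Or.inr (Or.inr ⟨c, List.mem_cons_self, hc, by rw [hcnt_self]; omega⟩)
          · refine Or.inr (Or.inr ⟨d, List.mem_cons_of_mem _ hd, ?_, by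
              rw [hcnt_ne d hdc]; exact hcnt⟩)
            intro h
            exact hnotmem (h ▸ List.mem_cons_of_mem _ hd)
        · rintro (h | h | ⟨d, hd, hdcur, hcnt⟩)
          · exact Or.inl (Or.inl h)
          · exact Or.inl (Or.inr (by omega))
          · rcases List.mem_cons.1 hd with rfl | hd'
            · rw [hcnt_self] at hcnt
              exact Or.inr (Or.inl (by omega))
            · by_cases hdc : d = c
              · subst hdc
                rw [hcnt_self] at hcnt
                exact Or.inr (Or.inl (by omega))
              · exact Or.inr (Or.inr ⟨d, hd', hdc, by
                  rw [hcnt_ne d hdc] at hcnt; exact hcnt⟩)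

-- membership in B's set of run lengths = some character of xs occurs exactly k times
theorem run_lengths_contains (xs : List Char) (k : Int) :
    ((rlFinish ((PySem.List.sorted xs (fun x => x) false).foldl rlStep
        (PySem.Set.empty, none, 0))).contains k = true) ↔
      ∃ d ∈ xs, (xs.count d : Int) = k := by
  have hperm := PySem.List.sorted_perm (xs := xs) (key := fun x => x) (rev := false)
  cases hss : PySem.List.sorted xs (fun x => x) false with
  | nil =>
      have hxs : xs = [] := by
        have := hss ▸ hperm
        exact this.symm.eq_nil
      subst hxs
      simp [rlFinish, PySem.Set.empty, PySem.Set.contains]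
  | cons c t =>
      have hpw : (c :: t).Pairwise (fun a b : Char => a ≤ b) := by
        have := PySem.List.sorted_pairwise (xs := xs) (key := fun x => x)
        rwa [hss] at this
      have hstep : rlStep (PySem.Set.empty, none, 0) c = (PySem.Set.empty, some c, 1) := by
        simp [rlStep, PySem.Set.empty]
      rw [List.foldl_cons, hstep,
        rl_fold_contains t PySem.Set.empty c 1 (le_refl 1)
          (hpw.sublist (List.sublist_cons_self c t))
          (fun y hy => List.rel_of_pairwise_cons hpw hy)]
      have hp : (c :: t).Perm xs := hss ▸ hperm
      have hcntx : ∀ d, xs.count d = (c :: t).count d := fun d => (hp.count_eq d).symm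
      have hmemx : ∀ d, d ∈ xs ↔ d ∈ c :: t := fun d => hp.mem_iff.symm
      have hcnt_self : ((c :: t).count c : Int) = (t.count c : Int) + 1 := by
        simp
      have hcnt_ne : ∀ d : Char, d ≠ c → ((c :: t).count d : Int) = (t.count d : Int) := by
        intro d hd
        have hcd : ¬ c = d := fun h => hd h.symm
        simp [hcd]
      constructor
      · rintro (h | h | ⟨d, hd, hdc, hcnt⟩)
        · exact absurd h (by simp [PySem.Set.empty])
        · exact ⟨c, (hmemx c).2 List.mem_cons_self, by rw [hcntx c, hcnt_self]; omega⟩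
        · exact ⟨d, (hmemx d).2 (List.mem_cons_of_mem _ hd), by
            rw [hcntx d, hcnt_ne d hdc]; exact hcnt⟩
      · rintro ⟨d, hd, hcnt⟩
        rw [hcntx d] at hcnt
        rcases List.mem_cons.1 ((hmemx d).1 hd) with rfl | hd'
        · refine Or.inr (Or.inl ?_)
          rw [hcnt_self] at hcnt; omega
        · by_cases hdc : d = c
          · subst hdc
            refine Or.inr (Or.inl ?_)
            rw [hcnt_self] at hcnt; omega
          · refine Or.inr (Or.inr ⟨d, hd', hdc, ?_⟩)
            rw [hcnt_ne d hdc] at hcnt; exact hcnt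

-- the two per-line helpers agree
theorem helpers_eq : check_for_duplicates_and_triplicates = check_run_lengths := by
  funext s
  simp only [check_for_duplicates_and_triplicates, check_run_lengths,
    values_counter_contains]
  have key : ∀ k : Int,
      (s.toList.any (fun c => PySem.List.count s.toList c == k))
        = (rlFinish ((PySem.List.sorted s.toList (fun x => x) false).foldl rlStep
            (PySem.Set.empty, none, 0))).contains k := by
    intro k
    apply Bool.eq_iff_iff.mpr
    rw [run_lengths_contains]
    simp only [List.any_eq_true, PySem.List.count_eq, beq_iff_eq]
  rw [key 2, key 3]

-- ===== VERDICT (by name: the statement is the Claim_ definition above) =====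
theorem hash_input_file_spec : Claim_equal_hash_input_file := by
  intro input_file _
  simp only [Spec_hash_input_file, hash_input_file, hash_input_file_alt, List.foldl_map,
    helpers_eq]
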